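-- pv_equiv track=rewrite | github.com/lifeplus1/CosmicHub | backend/astro/calculations/gene_keys.py | get_sphere
-- ===== SOURCE A (Python) =====
-- def get_sphere(gate_number: int) -> str:
--     """Get the sphere (life area) this gate belongs to"""
--     # Simplified sphere mapping - full implementation would use detailed Gene Keys mapping
--     sphere_mapping = {
--         range(1, 11): "Life Force",
--         range(11, 21): "Relationships",
--         range(21, 31): "Success",
--         range(31, 41): "Service",
--         range(41, 51): "Transformation",
--         range(51, 65): "Illumination",
--     }
--
--     for gate_range, sphere in sphere_mapping.items():
--         if gate_number in gate_range:
--             return sphere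
--
--     return "Unknown"
-- ===== SOURCE B (Python) =====
-- import bisect
--
-- _BOUNDS = [1, 11, 21, 31, 41, 51, 65]
-- _NAMES = ["Life Force", "Relationships", "Success", "Service",
--           "Transformation", "Illumination"]
--
-- def get_sphere(gate_number: int) -> str:
--     """Get the sphere (life area) this gate belongs to"""
--     idx = bisect.bisect_right(_BOUNDS, gate_number) - 1
--     if 0 <= idx < len(_NAMES):
--         return _NAMES[idx]
--     return "Unknown"
-- ===== Notes on version B (the rewrite author's own statement) =====
-- stated objective: idiomatic
-- what changed: Replaced the sequential membership test over six range objects by a binary search (bisect_right) over a sorted boundary list with a parallel names list.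
import Mathlib
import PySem

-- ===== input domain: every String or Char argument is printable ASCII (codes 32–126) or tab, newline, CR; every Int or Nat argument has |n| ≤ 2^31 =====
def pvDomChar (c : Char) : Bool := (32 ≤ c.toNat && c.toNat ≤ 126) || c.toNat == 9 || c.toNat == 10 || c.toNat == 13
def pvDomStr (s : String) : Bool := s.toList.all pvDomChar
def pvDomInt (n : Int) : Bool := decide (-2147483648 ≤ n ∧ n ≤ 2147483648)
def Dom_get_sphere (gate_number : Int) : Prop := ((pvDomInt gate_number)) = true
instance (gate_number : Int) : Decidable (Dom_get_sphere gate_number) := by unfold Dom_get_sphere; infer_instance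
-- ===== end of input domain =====

-- B replaces A's sequential scan over six range objects by a bisect_right binary
-- search over sorted cut-points (idiomatic alternative; same behaviour).

-- ===== PORT A =====
-- A iterates over the dict {range(1,11): "Life Force", …} in insertion order and
-- returns the sphere of the first range containing gate_number, else "Unknown".
def get_sphere (gate_number : Int) : String :=
  if 1 ≤ gate_number ∧ gate_number < 11 then "Life Force"
  else if 11 ≤ gate_number ∧ gate_number < 21 then "Relationships"
  else if 21 ≤ gate_number ∧ gate_number < 31 then "Success"
  else if 31 ≤ gate_number ∧ gate_number < 41 then "Service"
  else if 41 ≤ gate_number ∧ gate_number < 51 then "Transformation"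
  else if 51 ≤ gate_number ∧ gate_number < 65 then "Illumination"
  else "Unknown"

-- ===== PORT B =====
-- transliteration of bisect.bisect_right(a, x): binary search on lo ≤ … < hi
def pvBisectRight (a : List Int) (x : Int) (lo hi : Nat) : Nat :=
  if _h : lo < hi then
    let mid := (lo + hi) / 2
    if x < a.getD mid 0 then pvBisectRight a x lo mid
    else pvBisectRight a x (mid + 1) hi
  else lo
termination_by hi - lo
decreasing_by all_goals omega

def pvBounds : List Int := [1, 11, 21, 31, 41, 51, 65]
def pvNames : List String :=
  ["Life Force", "Relationships", "Success", "Service", "Transformation", "Illumination"]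

def get_sphere_alt (gate_number : Int) : String :=
  let idx : Int := (pvBisectRight pvBounds gate_number 0 pvBounds.length : Int) - 1
  if 0 ≤ idx ∧ idx < (pvNames.length : Int) then
    pvNames.getD idx.toNat "Unknown"
  else "Unknown"

-- ===== PRECONDITION & SPEC =====
def Spec_get_sphere (gate_number : Int) (out : String) : Prop := out = get_sphere_alt gate_number
instance (gate_number : Int) (out : String) : Decidable (Spec_get_sphere gate_number out) := by unfold Spec_get_sphere; infer_instance

-- ===== CLAIM (what is proved, stated in full; the proofs are below) =====
def Claim_equal_get_sphere : Prop := ∀ (gate_number : Int), Dom_get_sphere gate_number → Spec_get_sphere gate_number (get_sphere gate_number)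

-- ===== LEMMAS AND PROOFS =====
-- eight path lemmas: the value of the binary search on each interval of inputs

theorem seg0 (x : Int) (h2 : x < 1) : pvBisectRight pvBounds x 0 7 = 0 := by
  rw [pvBisectRight]; norm_num [pvBounds]
  rw [if_pos (by omega : x < 31)]
  rw [pvBisectRight]; norm_num [pvBounds]
  rw [if_pos (by omega : x < 11)]
  rw [pvBisectRight]; norm_num [pvBounds]
  rw [if_pos (by omega : x < 1)]
  rw [pvBisectRight]; norm_num

theorem seg1 (x : Int) (h1 : 1 ≤ x) (h2 : x < 11) : pvBisectRight pvBounds x 0 7 = 1 := by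
  rw [pvBisectRight]; norm_num [pvBounds]
  rw [if_pos (by omega : x < 31)]
  rw [pvBisectRight]; norm_num [pvBounds]
  rw [if_pos (by omega : x < 11)]
  rw [pvBisectRight]; norm_num [pvBounds]
  rw [if_neg (by omega : ¬ x < 1)]
  rw [pvBisectRight]; norm_num

theorem seg2 (x : Int) (h1 : 11 ≤ x) (h2 : x < 21) : pvBisectRight pvBounds x 0 7 = 2 := by
  rw [pvBisectRight]; norm_num [pvBounds]
  rw [if_pos (by omega : x < 31)]
  rw [pvBisectRight]; norm_num [pvBounds]
  rw [if_neg (by omega : ¬ x < 11)]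
  rw [pvBisectRight]; norm_num [pvBounds]
  rw [if_pos (by omega : x < 21)]
  rw [pvBisectRight]; norm_num

theorem seg3 (x : Int) (h1 : 21 ≤ x) (h2 : x < 31) : pvBisectRight pvBounds x 0 7 = 3 := by
  rw [pvBisectRight]; norm_num [pvBounds]
  rw [if_pos (by omega : x < 31)]
  rw [pvBisectRight]; norm_num [pvBounds]
  rw [if_neg (by omega : ¬ x < 11)]
  rw [pvBisectRight]; norm_num [pvBounds]
  rw [if_neg (by omega : ¬ x < 21)]
  rw [pvBisectRight]; norm_num

theorem seg4 (x : Int) (h1 : 31 ≤ x) (h2 : x < 41) : pvBisectRight pvBounds x 0 7 = 4 := by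
  rw [pvBisectRight]; norm_num [pvBounds]
  rw [if_neg (by omega : ¬ x < 31)]
  rw [pvBisectRight]; norm_num [pvBounds]
  rw [if_pos (by omega : x < 51)]
  rw [pvBisectRight]; norm_num [pvBounds]
  rw [if_pos (by omega : x < 41)]
  rw [pvBisectRight]; norm_num

theorem seg5 (x : Int) (h1 : 41 ≤ x) (h2 : x < 51) : pvBisectRight pvBounds x 0 7 = 5 := by
  rw [pvBisectRight]; norm_num [pvBounds]
  rw [if_neg (by omega : ¬ x < 31)]
  rw [pvBisectRight]; norm_num [pvBounds]
  rw [if_pos (by omega : x < 51)]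
  rw [pvBisectRight]; norm_num [pvBounds]
  rw [if_neg (by omega : ¬ x < 41)]
  rw [pvBisectRight]; norm_num

theorem seg6 (x : Int) (h1 : 51 ≤ x) (h2 : x < 65) : pvBisectRight pvBounds x 0 7 = 6 := by
  rw [pvBisectRight]; norm_num [pvBounds]
  rw [if_neg (by omega : ¬ x < 31)]
  rw [pvBisectRight]; norm_num [pvBounds]
  rw [if_neg (by omega : ¬ x < 51)]
  rw [pvBisectRight]; norm_num [pvBounds]
  rw [if_pos (by omega : x < 65)]
  rw [pvBisectRight]; norm_num

theorem seg7 (x : Int) (h1 : 65 ≤ x) : pvBisectRight pvBounds x 0 7 = 7 := by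
  rw [pvBisectRight]; norm_num [pvBounds]
  rw [if_neg (by omega : ¬ x < 31)]
  rw [pvBisectRight]; norm_num [pvBounds]
  rw [if_neg (by omega : ¬ x < 51)]
  rw [pvBisectRight]; norm_num [pvBounds]
  rw [if_neg (by omega : ¬ x < 65)]
  rw [pvBisectRight]; norm_num
-- ===== VERDICT (by name: the statement is the Claim_ definition above) =====
theorem get_sphere_spec : Claim_equal_get_sphere := by
  intro n _
  unfold Spec_get_sphere get_sphere get_sphere_alt
  have hL : pvBounds.length = 7 := rfl
  rw [hL]
  rcases lt_or_ge n 1 with h | h1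
  · rw [seg0 n h]; norm_num; split_ifs <;> first | rfl | omega
  rcases lt_or_ge n 11 with h | h2
  · rw [seg1 n h1 h]; norm_num [pvNames]; split_ifs <;> first | rfl | omega
  rcases lt_or_ge n 21 with h | h3
  · rw [seg2 n h2 h]; norm_num [pvNames]; split_ifs <;> first | rfl | omega
  rcases lt_or_ge n 31 with h | h4
  · rw [seg3 n h3 h]; norm_num [pvNames]; split_ifs <;> first | rfl | omega
  rcases lt_or_ge n 41 with h | h5
  · rw [seg4 n h4 h]; norm_num [pvNames]; split_ifs <;> first | rfl | omega
  rcases lt_or_ge n 51 with h | h6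
  · rw [seg5 n h5 h]; norm_num [pvNames]; split_ifs <;> first | rfl | omega
  rcases lt_or_ge n 65 with h | h7
  · rw [seg6 n h6 h]; norm_num [pvNames]; split_ifs <;> first | rfl | omega
  · rw [seg7 n h7]; norm_num; split_ifs <;> first | rfl | omega
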